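-- pv_equiv track=rewrite | github.com/markoub/power-it | backend/tools/wizard/general_wizard.py | _analyze_presentation_state
-- ===== SOURCE A (Python) =====
-- from typing import Dict, Any, Optional
--
-- def _analyze_presentation_state(presentation_data: Dict[str, Any]) -> Dict[str, str]:
--     """Analyze the current state of the presentation."""
--     steps = presentation_data.get("steps", [])
--
--     def get_step_status(step_name: str) -> str:
--         step = next((s for s in steps if s.get("step") == step_name), None)
--         if not step:
--             return "not_started"
--         return step.get("status", "unknown")
--
--     return {
--         "research_status": get_step_status("research"),
--         "slides_status": get_step_status("slides"),
--         "images_status": get_step_status("images"),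
--         "pptx_status": get_step_status("pptx")
--     }
-- ===== SOURCE B (Python) =====
-- def _analyze_presentation_state(presentation_data):
--     """Analyze the current state of the presentation."""
--     index = {}
--     for s in presentation_data.get("steps", []):
--         name = s.get("step")
--         if name not in index:
--             index[name] = s.get("status", "unknown")
--     names = ["research", "slides", "images", "pptx"]
--     return {n + "_status": (index[n] if n in index else "not_started") for n in names}
-- ===== Notes on version B (the rewrite author's own statement) =====
-- stated objective: idiomatic
-- what changed: B builds a first-occurrence name->status index in a single pass over the steps and answers the four fixed names by dictionary lookup, instead of A's four separate linear scans with next().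
import Mathlib
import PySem

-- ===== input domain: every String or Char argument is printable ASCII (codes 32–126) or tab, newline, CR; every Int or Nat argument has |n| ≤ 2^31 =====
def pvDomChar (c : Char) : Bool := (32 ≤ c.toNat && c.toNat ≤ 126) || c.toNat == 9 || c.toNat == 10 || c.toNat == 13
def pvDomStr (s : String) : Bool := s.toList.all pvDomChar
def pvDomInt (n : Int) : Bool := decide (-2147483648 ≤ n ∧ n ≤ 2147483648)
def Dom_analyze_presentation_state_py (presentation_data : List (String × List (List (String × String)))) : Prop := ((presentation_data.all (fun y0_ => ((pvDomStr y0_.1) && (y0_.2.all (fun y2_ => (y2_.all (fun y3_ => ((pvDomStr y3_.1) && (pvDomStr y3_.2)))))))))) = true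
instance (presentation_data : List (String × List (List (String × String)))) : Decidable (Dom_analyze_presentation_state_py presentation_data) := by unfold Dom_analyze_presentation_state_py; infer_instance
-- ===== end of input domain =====

-- B replaces A's four separate linear scans (one `next(...)` per step name) by one pass
-- building a first-occurrence name→status index, then four dictionary lookups (idiomatic).

-- ===== PORT A =====
-- `next((s for s in steps if s.get("step") == step_name), None)` then
-- `"not_started"` if none, else `step.get("status", "unknown")`.
def pvGetStepStatus (steps : List (List (String × String))) (step_name : String) : String :=
  match steps.find? (fun s => (PySem.Dict.mk s).get? "step" == some step_name) with
  | none => "not_started"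
  | some step => (PySem.Dict.mk step).getD "status" "unknown"

def analyze_presentation_state_py (presentation_data : List (String × List (List (String × String)))) : List (String × String) :=
  let steps := (PySem.Dict.mk presentation_data).getD "steps" []
  [("research_status", pvGetStepStatus steps "research"),
   ("slides_status", pvGetStepStatus steps "slides"),
   ("images_status", pvGetStepStatus steps "images"),
   ("pptx_status", pvGetStepStatus steps "pptx")]

-- ===== PORT B =====
-- one pass: index[name] = s.get("status","unknown") only if name not already in index
def pvBuildIndex (steps : List (List (String × String))) : PySem.Dict (Option String) String :=
  steps.foldl (fun idx s =>
    let name := (PySem.Dict.mk s).get? "step"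
    if idx.contains name then idx
    else idx.insert name ((PySem.Dict.mk s).getD "status" "unknown")) PySem.Dict.empty

def analyze_presentation_state_py_alt (presentation_data : List (String × List (List (String × String)))) : List (String × String) :=
  let steps := (PySem.Dict.mk presentation_data).getD "steps" []
  let idx := pvBuildIndex steps
  ["research", "slides", "images", "pptx"].map (fun n =>
    (n ++ "_status", match idx.get? (some n) with
                     | some v => v
                     | none => "not_started"))

-- ===== PRECONDITION & SPEC =====
def Spec_analyze_presentation_state_py (presentation_data : List (String × List (List (String × String)))) (out : List (String × String)) : Prop := out = analyze_presentation_state_py_alt presentation_data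
instance (presentation_data : List (String × List (List (String × String)))) (out : List (String × String)) : Decidable (Spec_analyze_presentation_state_py presentation_data out) := by unfold Spec_analyze_presentation_state_py; infer_instance

-- ===== CLAIM (what is proved, stated in full; the proofs are below) =====
def Claim_equal_analyze_presentation_state_py : Prop := ∀ (presentation_data : List (String × List (List (String × String)))), Dom_analyze_presentation_state_py presentation_data → Spec_analyze_presentation_state_py presentation_data (analyze_presentation_state_py presentation_data)

-- ===== LEMMAS AND PROOFS =====

-- lookup in the accumulated index after folding `steps` = accumulator's value, or else A's scan
lemma get?_pvBuildIndex_aux (steps : List (List (String × String)))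
    (idx : PySem.Dict (Option String) String) (key : Option String) :
    (steps.foldl (fun idx s =>
      let name := (PySem.Dict.mk s).get? "step"
      if idx.contains name then idx
      else idx.insert name ((PySem.Dict.mk s).getD "status" "unknown")) idx).get? key =
    ((idx.get? key).orElse (fun _ =>
      (steps.find? (fun s => (PySem.Dict.mk s).get? "step" == key)).map
        (fun step => (PySem.Dict.mk step).getD "status" "unknown"))) := by
  induction steps generalizing idx with
  | nil => cases h : idx.get? key <;> simp [Option.orElse, h]
  | cons s rest ih =>
    simp only [List.foldl_cons, List.find?]
    rw [ih]
    by_cases hk : (PySem.Dict.mk s).get? "step" = key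
    · subst hk
      simp only [beq_self_eq_true]
      by_cases hc : idx.contains ((PySem.Dict.mk s).get? "step") = true
      · rw [if_pos hc, PySem.Dict.contains_eq_isSome_get?] at *
        obtain ⟨w, hw⟩ := Option.isSome_iff_exists.mp hc
        simp [hw, Option.orElse]
      · have hnone : idx.get? ((PySem.Dict.mk s).get? "step") = none := by
          rw [PySem.Dict.contains_eq_isSome_get?] at hc
          cases h : idx.get? ((PySem.Dict.mk s).get? "step") with
          | none => rfl
          | some w => rw [h] at hc; simp at hc
        rw [if_neg hc, PySem.Dict.get?_insert_self, hnone]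
        simp [Option.orElse]
    · have hbeq : ((PySem.Dict.mk s).get? "step" == key) = false :=
        beq_eq_false_iff_ne.mpr hk
      simp only [hbeq]
      by_cases hc : idx.contains ((PySem.Dict.mk s).get? "step") = true
      · rw [if_pos hc]
      · rw [if_neg hc, PySem.Dict.get?_insert_of_ne idx _ (Ne.symm hk)]

lemma get?_pvBuildIndex (steps : List (List (String × String))) (n : String) :
    (match (pvBuildIndex steps).get? (some n) with
     | some v => v
     | none => "not_started") = pvGetStepStatus steps n := by
  unfold pvBuildIndex pvGetStepStatus
  rw [get?_pvBuildIndex_aux, PySem.Dict.get?_empty]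
  cases steps.find? (fun s => (PySem.Dict.mk s).get? "step" == some n) <;>
    simp [Option.orElse]

-- ===== VERDICT (by name: the statement is the Claim_ definition above) =====
theorem analyze_presentation_state_py_spec : Claim_equal_analyze_presentation_state_py := by
  intro pd _
  unfold Spec_analyze_presentation_state_py analyze_presentation_state_py analyze_presentation_state_py_alt
  have h1 : ("research" ++ "_status" : String) = "research_status" := by decide
  have h2 : ("slides" ++ "_status" : String) = "slides_status" := by decide
  have h3 : ("images" ++ "_status" : String) = "images_status" := by decide
  have h4 : ("pptx" ++ "_status" : String) = "pptx_status" := by decide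
  simp only [List.map, h1, h2, h3, h4, get?_pvBuildIndex]
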